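-- pv_equiv track=rewrite | github.com/darkliang/JudeeBE | problem/views.py | check_name_list
-- ===== SOURCE A (Python) =====
-- def check_name_list(name_list, case_num):
--     prefix = 0
--     while True:
--         prefix += 1
--         in_name = "{}.in".format(prefix)
--         out_name = "{}.out".format(prefix)
--         if in_name in name_list and out_name in name_list:
--             continue
--         else:
--             if len(name_list) == (prefix - 1) * 2:
--                 return (True, "Upload success") if case_num == prefix - 1 else (False, "Wrong case number")
--             else:
--                 return False, "Wrong filename format"
-- ===== SOURCE B (Python) =====
-- def check_name_list(name_list, case_num):
--     n = len(name_list)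
--     if n % 2 == 1:
--         return False, "Wrong filename format"
--     k = n // 2
--     expected = set()
--     for i in range(1, k + 1):
--         expected.add("{}.in".format(i))
--         expected.add("{}.out".format(i))
--     if set(name_list) != expected:
--         return False, "Wrong filename format"
--     return (True, "Upload success") if case_num == k else (False, "Wrong case number")
-- ===== Notes on version B (the rewrite author's own statement) =====
-- stated objective: simpler
-- what changed: Instead of A's unbounded upward probing loop that tests each prefix's '.in'/'.out' pair by repeated list membership scans, B builds the full expected filename set for k = len(name_list)//2 once and compares it to set(name_list) in a single pass.
import Mathlib
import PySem

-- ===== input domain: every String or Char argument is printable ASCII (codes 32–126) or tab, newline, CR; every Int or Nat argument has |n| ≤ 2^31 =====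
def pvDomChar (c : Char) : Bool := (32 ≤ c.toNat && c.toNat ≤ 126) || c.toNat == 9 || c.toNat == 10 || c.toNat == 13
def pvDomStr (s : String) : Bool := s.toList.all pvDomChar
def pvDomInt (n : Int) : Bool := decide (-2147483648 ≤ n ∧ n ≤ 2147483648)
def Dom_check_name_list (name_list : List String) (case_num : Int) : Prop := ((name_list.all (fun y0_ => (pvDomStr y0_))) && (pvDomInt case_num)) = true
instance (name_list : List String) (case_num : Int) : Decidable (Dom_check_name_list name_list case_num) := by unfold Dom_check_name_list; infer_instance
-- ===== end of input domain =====

-- B replaces A's incremental membership probing by one build-the-expected-set-and-compare pass (objective: simpler).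

-- ===== PORT A =====
-- A's 'while True' loop, transliterated step for step; the fuel only makes the
-- recursion total (name_list.length + 1 iterations always suffice — proved below,
-- the fuel-0 branch is unreachable).
def checkLoopA (name_list : List String) (case_num : Int) (pfx : Int) : Nat → Bool × String
  | 0 => (false, "Wrong filename format")   -- unreachable fuel exhaustion
  | fuel + 1 =>
    let pfx := pfx + 1   -- Python's 'prefix' (a Lean keyword)
    let in_name := PySem.Int.toStr pfx ++ ".in"
    let out_name := PySem.Int.toStr pfx ++ ".out"
    if in_name ∈ name_list ∧ out_name ∈ name_list then
      checkLoopA name_list case_num pfx fuel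
    else
      if PySem.List.len name_list = (pfx - 1) * 2 then
        if case_num = pfx - 1 then (true, "Upload success") else (false, "Wrong case number")
      else
        (false, "Wrong filename format")

def check_name_list (name_list : List String) (case_num : Int) : Bool × String :=
  checkLoopA name_list case_num 0 (name_list.length + 1)

-- ===== PORT B =====
def check_name_list_alt (name_list : List String) (case_num : Int) : Bool × String :=
  let n := PySem.List.len name_list
  if PySem.Int.mod n 2 = 1 then (false, "Wrong filename format")
  else
    let k := PySem.Int.floordiv n 2
    let expected : PySem.Set String :=
      (PySem.List.pyRange 1 (k + 1) 1).foldl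
        (fun s i => PySem.Set.add (PySem.Set.add s (PySem.Int.toStr i ++ ".in"))
                                  (PySem.Int.toStr i ++ ".out"))
        PySem.Set.empty
    if ¬ PySem.Set.equal (PySem.Set.ofList name_list) expected then
      (false, "Wrong filename format")
    else
      if case_num = k then (true, "Upload success") else (false, "Wrong case number")

-- ===== PRECONDITION & SPEC =====
def Spec_check_name_list (name_list : List String) (case_num : Int) (out : Bool × String) : Prop := out = check_name_list_alt name_list case_num
instance (name_list : List String) (case_num : Int) (out : Bool × String) : Decidable (Spec_check_name_list name_list case_num out) := by unfold Spec_check_name_list; infer_instance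

-- ===== CLAIM (what is proved, stated in full; the proofs are below) =====
def Claim_equal_check_name_list : Prop := ∀ (name_list : List String) (case_num : Int), Dom_check_name_list name_list case_num → Spec_check_name_list name_list case_num (check_name_list name_list case_num)

-- ===== LEMMAS AND PROOFS =====

-- abbreviations for the two filename shapes
def inN (i : Int) : String := PySem.Int.toStr i ++ ".in"
def outN (i : Int) : String := PySem.Int.toStr i ++ ".out"

lemma digitChar_inj {a b : Nat} (ha : a < 10) (hb : b < 10) (h : Nat.digitChar a = Nat.digitChar b) : a = b := by
  interval_cases a <;> interval_cases b <;> simp_all [Nat.digitChar]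

lemma toDigits10_inj : ∀ m n : Nat, Nat.toDigits 10 m = Nat.toDigits 10 n → m = n := by
  intro m
  induction m using Nat.strong_induction_on with
  | _ m ih =>
    intro n h
    by_cases hm : m < 10 <;> by_cases hn : n < 10
    · rw [Nat.toDigits_of_lt_base hm, Nat.toDigits_of_lt_base hn] at h
      exact digitChar_inj hm hn (List.singleton_inj.mp h)
    · have e2 := Nat.toDigits_of_base_le (b := 10) (n := n) (by norm_num) (by omega)
      rw [Nat.toDigits_of_lt_base hm, e2] at h
      have hl1 := congrArg List.length h
      have hl2 := @Nat.length_toDigits_pos 10 (n / 10)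
      simp only [List.length_append, List.length_cons, List.length_nil] at hl1
      omega
    · have e1 := Nat.toDigits_of_base_le (b := 10) (n := m) (by norm_num) (by omega)
      rw [e1, Nat.toDigits_of_lt_base hn] at h
      have hl1 := congrArg List.length h
      have hl2 := @Nat.length_toDigits_pos 10 (m / 10)
      simp only [List.length_append, List.length_cons, List.length_nil] at hl1
      omega
    · have e1 := Nat.toDigits_of_base_le (b := 10) (n := m) (by norm_num) (by omega)
      have e2 := Nat.toDigits_of_base_le (b := 10) (n := n) (by norm_num) (by omega)
      rw [e1, e2] at h
      have h2 := List.append_inj' h rfl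
      have hdiv : m / 10 = n / 10 := ih (m / 10) (by omega) _ h2.1
      have hmod : m % 10 = n % 10 :=
        digitChar_inj (Nat.mod_lt _ (by norm_num)) (Nat.mod_lt _ (by norm_num))
          (List.singleton_inj.mp h2.2)
      omega

lemma toChars_inj {m n : Int} (hm : 0 ≤ m) (hn : 0 ≤ n)
    (h : PySem.Int.toChars m = PySem.Int.toChars n) : m = n := by
  unfold PySem.Int.toChars at h
  rw [if_neg (by omega), if_neg (by omega)] at h
  have := toDigits10_inj _ _ h
  omega

lemma toStr_toList (m : Int) : (PySem.Int.toStr m).toList = PySem.Int.toChars m :=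
  PySem.Int.toList_toStr m

lemma append_toList (s t : String) : (s ++ t).toList = s.toList ++ t.toList := by
  simp

lemma inN_inj {m n : Int} (hm : 0 ≤ m) (hn : 0 ≤ n) (h : inN m = inN n) : m = n := by
  have h' := congrArg String.toList h
  simp only [inN, append_toList, toStr_toList] at h'
  exact toChars_inj hm hn (List.append_cancel_right h')

lemma outN_inj {m n : Int} (hm : 0 ≤ m) (hn : 0 ≤ n) (h : outN m = outN n) : m = n := by
  have h' := congrArg String.toList h
  simp only [outN, append_toList, toStr_toList] at h'
  exact toChars_inj hm hn (List.append_cancel_right h')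

lemma inN_ne_outN (m n : Int) : inN m ≠ outN n := by
  intro h
  have h' := congrArg (fun s => s.toList.reverse) h
  simp only [inN, outN, append_toList, toStr_toList, List.reverse_append] at h'
  have : (".in".toList.reverse : List Char) = ['n', 'i', '.'] := by decide
  have : (".out".toList.reverse : List Char) = ['t', 'u', 'o', '.'] := by decide
  simp_all

-- the expected-set fold of port B: membership characterisation
lemma mem_expected_fold (xs : List Int) (s : PySem.Set String) (x : String) :
    x ∈ xs.foldl (fun s i => PySem.Set.add (PySem.Set.add s (inN i)) (outN i)) s ↔
      x ∈ s ∨ ∃ i ∈ xs, x = inN i ∨ x = outN i := by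
  induction xs generalizing s with
  | nil => simp
  | cons y ys ih =>
    simp only [List.foldl_cons, ih, PySem.Set.mem_add, List.mem_cons]
    constructor
    · rintro (((h | h) | h) | ⟨i, hi, h⟩)
      · exact Or.inl h
      · exact Or.inr ⟨y, Or.inl rfl, Or.inl h⟩
      · exact Or.inr ⟨y, Or.inl rfl, Or.inr h⟩
      · exact Or.inr ⟨i, Or.inr hi, h⟩
    · rintro (h | ⟨i, (rfl | hi), h⟩)
      · exact Or.inl (Or.inl (Or.inl h))
      · rcases h with h | h
        · exact Or.inl (Or.inl (Or.inr h))
        · exact Or.inl (Or.inr h)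
      · exact Or.inr ⟨i, hi, h⟩

-- pigeonhole: if 1.in, …, p.in all occur in l then p ≤ |l|
lemma good_le (l : List String) (p : Int) (hp : 0 ≤ p)
    (h : ∀ i : Int, 1 ≤ i → i ≤ p → inN i ∈ l) : p ≤ (l.length : Int) := by
  classical
  have hsub : (Finset.Icc 1 p).image inN ⊆ l.toFinset := by
    intro x hx
    simp only [Finset.mem_image, Finset.mem_Icc] at hx
    obtain ⟨i, ⟨h1, h2⟩, rfl⟩ := hx
    exact List.mem_toFinset.mpr (h i h1 h2)
  have hcard : ((Finset.Icc 1 p).image inN).card = (Finset.Icc 1 p).card := by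
    apply Finset.card_image_of_injOn
    intro a ha b hb hab
    simp only [Finset.coe_Icc, Set.mem_Icc] at ha hb
    exact inN_inj (by omega) (by omega) hab
  have h1 := Finset.card_le_card hsub
  have h2 := l.toFinset_card_le
  rw [hcard, Int.card_Icc] at h1
  omega

-- if additionally all .out names occur and |l| = 2p, then l's members are EXACTLY the 2p names
lemma members_exact (l : List String) (p : Int) (hp : 0 ≤ p)
    (h : ∀ i : Int, 1 ≤ i → i ≤ p → inN i ∈ l ∧ outN i ∈ l)
    (hlen : (l.length : Int) = 2 * p) (x : String) :
    x ∈ l ↔ ∃ i : Int, 1 ≤ i ∧ i ≤ p ∧ (x = inN i ∨ x = outN i) := by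
  classical
  set S : Finset String := (Finset.Icc 1 p).image inN ∪ (Finset.Icc 1 p).image outN with hS
  have hsub : S ⊆ l.toFinset := by
    intro x hx
    simp only [hS, Finset.mem_union, Finset.mem_image, Finset.mem_Icc] at hx
    rcases hx with ⟨i, ⟨h1, h2⟩, rfl⟩ | ⟨i, ⟨h1, h2⟩, rfl⟩
    · exact List.mem_toFinset.mpr (h i h1 h2).1
    · exact List.mem_toFinset.mpr (h i h1 h2).2
  have hin : ((Finset.Icc 1 p).image inN).card = (Finset.Icc 1 p).card :=
    Finset.card_image_of_injOn (fun a ha b hb hab => by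
      simp only [Finset.coe_Icc, Set.mem_Icc] at ha hb
      exact inN_inj (by omega) (by omega) hab)
  have hout : ((Finset.Icc 1 p).image outN).card = (Finset.Icc 1 p).card :=
    Finset.card_image_of_injOn (fun a ha b hb hab => by
      simp only [Finset.coe_Icc, Set.mem_Icc] at ha hb
      exact outN_inj (by omega) (by omega) hab)
  have hdisj : Disjoint ((Finset.Icc 1 p).image inN) ((Finset.Icc 1 p).image outN) := by
    rw [Finset.disjoint_left]
    intro a ha hb
    simp only [Finset.mem_image] at ha hb
    obtain ⟨i, _, rfl⟩ := ha
    obtain ⟨j, _, hj⟩ := hb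
    exact inN_ne_outN i j hj.symm
  have hScard : S.card = (Finset.Icc 1 p).card + (Finset.Icc 1 p).card := by
    rw [hS, Finset.card_union_of_disjoint hdisj, hin, hout]
  have hIcc : ((Finset.Icc 1 p).card : Int) = p := by
    rw [Int.card_Icc]; omega
  have hcard2 : l.toFinset.card ≤ S.card := by
    have h2 := l.toFinset_card_le
    have : (S.card : Int) = 2 * p := by push_cast [hScard]; omega
    omega
  have heq : S = l.toFinset := Finset.eq_of_subset_of_card_le hsub hcard2
  rw [← List.mem_toFinset, ← heq]
  simp only [hS, Finset.mem_union, Finset.mem_image, Finset.mem_Icc]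
  constructor
  · rintro (⟨i, ⟨h1, h2⟩, rfl⟩ | ⟨i, ⟨h1, h2⟩, rfl⟩)
    · exact ⟨i, h1, h2, Or.inl rfl⟩
    · exact ⟨i, h1, h2, Or.inr rfl⟩
  · rintro ⟨i, h1, h2, rfl | rfl⟩
    · exact Or.inl ⟨i, ⟨h1, h2⟩, rfl⟩
    · exact Or.inr ⟨i, ⟨h1, h2⟩, rfl⟩

-- B's value on the three kinds of input
lemma alt_odd (l : List String) (c : Int) (hodd : (l.length : Int) % 2 = 1) :
    check_name_list_alt l c = (false, "Wrong filename format") := by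
  unfold check_name_list_alt
  simp only [PySem.List.len_eq]
  simp only [PySem.Int.mod_eq_emod_of_pos (show (0:Int) < 2 by norm_num)]
  simp [hodd]

lemma equal_expected_iff (l : List String) :
    (PySem.Set.equal (PySem.Set.ofList l)
      ((PySem.List.pyRange 1 ((l.length : Int) / 2 + 1) 1).foldl
        (fun s i => PySem.Set.add (PySem.Set.add s (PySem.Int.toStr i ++ ".in"))
                                  (PySem.Int.toStr i ++ ".out")) PySem.Set.empty) = true) ↔
      (∀ x, x ∈ l ↔ ∃ i : Int, 1 ≤ i ∧ i ≤ (l.length : Int) / 2 ∧ (x = inN i ∨ x = outN i)) := by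
  rw [PySem.Set.equal_iff]
  have hmem : ∀ x : String,
      (x ∈ (PySem.List.pyRange 1 ((l.length : Int) / 2 + 1) 1).foldl
        (fun s i => PySem.Set.add (PySem.Set.add s (PySem.Int.toStr i ++ ".in"))
                                  (PySem.Int.toStr i ++ ".out")) PySem.Set.empty) ↔
        ∃ i : Int, 1 ≤ i ∧ i ≤ (l.length : Int) / 2 ∧ (x = inN i ∨ x = outN i) := by
    intro x
    rw [show (fun (s : PySem.Set String) (i : Int) =>
        PySem.Set.add (PySem.Set.add s (PySem.Int.toStr i ++ ".in")) (PySem.Int.toStr i ++ ".out"))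
      = (fun s i => PySem.Set.add (PySem.Set.add s (inN i)) (outN i)) from rfl]
    rw [mem_expected_fold]
    simp only [PySem.Set.empty, List.not_mem_nil, false_or, PySem.List.mem_pyRange_one]
    constructor
    · rintro ⟨i, ⟨h1, h2⟩, h⟩; exact ⟨i, h1, by omega, h⟩
    · rintro ⟨i, h1, h2, h⟩; exact ⟨i, ⟨h1, by omega⟩, h⟩
  constructor
  · intro hc x
    rw [← PySem.Set.mem_ofList (xs := l), hc, hmem]
  · intro hc x
    rw [PySem.Set.mem_ofList, hmem, hc]

lemma alt_match (l : List String) (c : Int) (hodd : ¬ (l.length : Int) % 2 = 1)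
    (hset : ∀ x, x ∈ l ↔ ∃ i : Int, 1 ≤ i ∧ i ≤ (l.length : Int) / 2 ∧ (x = inN i ∨ x = outN i)) :
    check_name_list_alt l c =
      if c = (l.length : Int) / 2 then (true, "Upload success")
      else (false, "Wrong case number") := by
  unfold check_name_list_alt
  simp only [PySem.List.len_eq]
  simp only [PySem.Int.mod_eq_emod_of_pos (show (0:Int) < 2 by norm_num), PySem.Int.floordiv_eq_ediv_of_pos (show (0:Int) < 2 by norm_num)]
  rw [if_neg hodd]
  have hc := (equal_expected_iff l).mpr hset
  rw [if_neg (not_not_intro hc)]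

lemma alt_mismatch (l : List String) (c : Int) (hodd : ¬ (l.length : Int) % 2 = 1)
    (hset : ¬ ∀ x, x ∈ l ↔ ∃ i : Int, 1 ≤ i ∧ i ≤ (l.length : Int) / 2 ∧ (x = inN i ∨ x = outN i)) :
    check_name_list_alt l c = (false, "Wrong filename format") := by
  unfold check_name_list_alt
  simp only [PySem.List.len_eq]
  simp only [PySem.Int.mod_eq_emod_of_pos (show (0:Int) < 2 by norm_num), PySem.Int.floordiv_eq_ediv_of_pos (show (0:Int) < 2 by norm_num)]
  rw [if_neg hodd]
  have hc : ¬ (PySem.Set.equal (PySem.Set.ofList l)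
      ((PySem.List.pyRange 1 ((l.length : Int) / 2 + 1) 1).foldl
        (fun s i => PySem.Set.add (PySem.Set.add s (PySem.Int.toStr i ++ ".in"))
                                  (PySem.Int.toStr i ++ ".out")) PySem.Set.empty) = true) :=
    fun hc => hset ((equal_expected_iff l).mp hc)
  rw [if_pos hc]

-- main loop invariant: as long as all pairs 1..p are present and the fuel covers the
-- remaining search space, A's loop computes B's value
lemma loop_eq (l : List String) (c : Int) :
    ∀ (fuel : Nat) (p : Int), 0 ≤ p →
      (∀ i : Int, 1 ≤ i → i ≤ p → inN i ∈ l ∧ outN i ∈ l) →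
      (l.length : Int) < p + fuel →
      checkLoopA l c p fuel = check_name_list_alt l c := by
  intro fuel
  induction fuel with
  | zero =>
    intro p hp hgood hfuel
    exfalso
    have := good_le l p hp (fun i h1 h2 => (hgood i h1 h2).1)
    omega
  | succ f ih =>
    intro p hp hgood hfuel
    rw [checkLoopA]
    show (if (PySem.Int.toStr (p + 1) ++ ".in") ∈ l ∧ (PySem.Int.toStr (p + 1) ++ ".out") ∈ l then checkLoopA l c (p + 1) f else if PySem.List.len l = (p + 1 - 1) * 2 then (if c = p + 1 - 1 then (true, "Upload success") else (false, "Wrong case number")) else (false, "Wrong filename format")) = check_name_list_alt l c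
    by_cases hcont : (PySem.Int.toStr (p + 1) ++ ".in") ∈ l ∧ (PySem.Int.toStr (p + 1) ++ ".out") ∈ l
    · rw [if_pos hcont]
      apply ih (p + 1) (by omega)
      · intro i h1 h2
        by_cases hi : i ≤ p
        · exact hgood i h1 hi
        · have : i = p + 1 := by omega
          subst this
          exact hcont
      · omega
    · rw [if_neg hcont]
      simp only [PySem.List.len_eq, add_sub_cancel_right]
      by_cases hodd : (l.length : Int) % 2 = 1
      · rw [alt_odd l c hodd, if_neg (by omega)]
      · by_cases hlen : (l.length : Int) = p * 2
        · have hk : (l.length : Int) / 2 = p := by omega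
          have hexact := members_exact l p hp hgood (by omega)
          rw [if_pos hlen, alt_match l c hodd (by rw [hk]; exact hexact), hk]
        · rw [if_neg hlen]
          set k := (l.length : Int) / 2 with hkdef
          have hkne : k ≠ p := by omega
          have hset : ¬ (∀ x, x ∈ l ↔ ∃ i : Int, 1 ≤ i ∧ i ≤ k ∧ (x = inN i ∨ x = outN i)) := by
            intro hmem
            rcases lt_or_gt_of_ne hkne with hlt | hgt
            · -- k < p: then p ≥ 1 and inN p ∈ l but p > k
              have hp1 : 1 ≤ p := by
                have hk0 : 0 ≤ k := by positivity
                omega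
              have hinp : inN p ∈ l := (hgood p hp1 le_rfl).1
              rcases (hmem (inN p)).mp hinp with ⟨i, h1, h2, h | h⟩
              · have := inN_inj (by omega) (by omega) h
                omega
              · exact inN_ne_outN p i h
            · -- k > p: then p+1 ≤ k so both (p+1)-names are in l, contradicting hcont
              apply hcont
              constructor
              · exact (hmem (inN (p + 1))).mpr ⟨p + 1, by omega, by omega, Or.inl rfl⟩
              · exact (hmem (outN (p + 1))).mpr ⟨p + 1, by omega, by omega, Or.inr rfl⟩
          exact (alt_mismatch l c hodd hset).symm

-- ===== VERDICT (by name: the statement is the Claim_ definition above) =====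
theorem check_name_list_spec : Claim_equal_check_name_list := by
  intro l c _
  unfold Spec_check_name_list check_name_list
  exact loop_eq l c (l.length + 1) 0 le_rfl (by intro i h1 h2; omega) (by push_cast; omega)
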